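-- pv_equiv track=rewrite | github.com/SilentCanary/ATLAS | utils/planner.py | _format_code_snippets
-- ===== SOURCE A (Python) =====
-- def _format_code_snippets(code_dict: dict, max_chars: int = 12000) -> str:
--     """Format code snippets for prompt injection, truncating if too large."""
--     if not code_dict:
--         return "No code snippets available."
--     sections = []
--     total = 0
--     for name, code in code_dict.items():
--         snippet = f"### {name}\n```python\n{code}\n```"
--         if total + len(snippet) > max_chars:
--             sections.append(f"... ({len(code_dict) - len(sections)} more snippets truncated)")
--             break
--         sections.append(snippet)
--         total += len(snippet)
--     return "\n\n".join(sections)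
-- ===== SOURCE B (Python) =====
-- def _format_code_snippets(code_dict: dict, max_chars: int = 12000) -> str:
--     """Format code snippets for prompt injection, truncating if too large."""
--     if not code_dict:
--         return "No code snippets available."
--     snippets = [f"### {name}\n```python\n{code}\n```"
--                 for name, code in code_dict.items()]
--     # Prefix sums of snippet lengths; nondecreasing, so bisect_right-style
--     # binary search finds how many leading snippets fit in the budget.
--     prefix = []
--     total = 0
--     for s in snippets:
--         total += len(s)
--         prefix.append(total)
--     lo, hi = 0, len(prefix)
--     while lo < hi:
--         mid = (lo + hi) // 2
--         if prefix[mid] <= max_chars: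
--             lo = mid + 1
--         else:
--             hi = mid
--     if lo == len(snippets):
--         return "\n\n".join(snippets)
--     return "\n\n".join(snippets[:lo]
--                        + [f"... ({len(snippets) - lo} more snippets truncated)"])
-- ===== Notes on version B (the rewrite author's own statement) =====
-- stated objective: alternative
-- what changed: B formats all snippets first, builds the prefix-sum array of their lengths, and locates the cutoff by a bisect_right-style binary search on that monotone array (then slices and joins), instead of A's single loop that interleaves formatting, budget accounting and breaking with the truncation line.
import Mathlib
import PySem

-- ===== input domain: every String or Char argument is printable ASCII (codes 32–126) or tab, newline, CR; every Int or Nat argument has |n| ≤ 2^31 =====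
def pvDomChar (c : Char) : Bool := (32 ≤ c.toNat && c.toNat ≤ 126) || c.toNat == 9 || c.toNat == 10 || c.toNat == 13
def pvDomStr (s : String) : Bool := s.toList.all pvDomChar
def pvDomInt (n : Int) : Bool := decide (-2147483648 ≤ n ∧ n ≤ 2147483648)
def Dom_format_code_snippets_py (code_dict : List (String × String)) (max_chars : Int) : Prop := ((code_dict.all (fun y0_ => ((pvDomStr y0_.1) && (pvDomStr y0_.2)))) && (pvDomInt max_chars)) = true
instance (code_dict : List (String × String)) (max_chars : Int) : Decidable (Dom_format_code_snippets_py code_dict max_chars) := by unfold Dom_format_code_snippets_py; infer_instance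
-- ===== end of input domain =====

-- B formats all snippets first, builds the prefix-sum list of their lengths, and finds the
-- cutoff by a bisect_right-style binary search on that monotone list, then slices and joins
-- (objective: alternative; A is a single loop interleaving formatting, budget accounting and break).


-- ===== PORT A =====
-- shared formatting of one snippet:  f"### {name}\n```python\n{code}\n```"
def pvFmt (p : String × String) : String :=
  "### " ++ p.1 ++ "\n```python\n" ++ p.2 ++ "\n```"

-- the truncation line:  f"... ({k} more snippets truncated)"
def pvMsg (k : Int) : String :=
  "... (" ++ PySem.Int.toStr k ++ " more snippets truncated)"

-- A's loop: n = len(code_dict); builds `sections`, breaks with the truncation line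
def pvA_loop (n max_chars : Int) : List (String × String) → List String → Int → List String
  | [], sections, _ => sections
  | (name, code) :: rest, sections, total =>
    let snippet := pvFmt (name, code)
    if total + PySem.Str.len snippet > max_chars then
      sections ++ [pvMsg (n - sections.length)]
    else
      pvA_loop n max_chars rest (sections ++ [snippet]) (total + PySem.Str.len snippet)

def format_code_snippets_py (code_dict : List (String × String)) (max_chars : Int) : String :=
  let items := (PySem.Dict.ofList code_dict).items
  if items.isEmpty then "No code snippets available."
  else PySem.Str.join "\n\n" (pvA_loop items.length max_chars items [] 0)

-- ===== PORT B =====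
-- B's prefix-sum loop: running totals of the snippet lengths
def pvPrefix : List String → Int → List Int
  | [], _ => []
  | s :: rest, total =>
    let total' := total + PySem.Str.len s
    total' :: pvPrefix rest total'

-- B's while-loop: bisect_right-style binary search on the prefix list.
-- `prefix[mid]` is always in range (lo ≤ mid < hi ≤ len), so getD's default is never used.
def pvBsearch (P : List Int) (max_chars : Int) (lo hi : Nat) : Nat :=
  if lo < hi then
    if P.getD ((lo + hi) / 2) 0 ≤ max_chars then pvBsearch P max_chars ((lo + hi) / 2 + 1) hi
    else pvBsearch P max_chars lo ((lo + hi) / 2)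
  else lo
termination_by hi - lo
decreasing_by all_goals omega

def format_code_snippets_py_alt (code_dict : List (String × String)) (max_chars : Int) : String :=
  let items := (PySem.Dict.ofList code_dict).items
  if items.isEmpty then "No code snippets available."
  else
    let snippets := items.map pvFmt
    let pref := pvPrefix snippets 0
    let lo := pvBsearch pref max_chars 0 pref.length
    if lo = snippets.length then PySem.Str.join "\n\n" snippets
    else PySem.Str.join "\n\n"
      (snippets.take lo ++ [pvMsg ((snippets.length : Int) - lo)])

-- ===== PRECONDITION & SPEC =====
def Spec_format_code_snippets_py (code_dict : List (String × String)) (max_chars : Int) (out : String) : Prop := out = format_code_snippets_py_alt code_dict max_chars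
instance (code_dict : List (String × String)) (max_chars : Int) (out : String) : Decidable (Spec_format_code_snippets_py code_dict max_chars out) := by unfold Spec_format_code_snippets_py; infer_instance

-- ===== CLAIM (what is proved, stated in full; the proofs are below) =====
def Claim_equal_format_code_snippets_py : Prop := ∀ (code_dict : List (String × String)) (max_chars : Int), Dom_format_code_snippets_py code_dict max_chars → Spec_format_code_snippets_py code_dict max_chars (format_code_snippets_py code_dict max_chars)

-- ===== LEMMAS AND PROOFS =====
-- Proof-side cutoff characterisation of A's loop: first index whose cumulative length exceeds the budget
def pvCut (max_chars : Int) : List String → Int → Option Nat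
  | [], _ => none
  | s :: rest, running =>
    let running' := running + PySem.Str.len s
    if running' > max_chars then some 0
    else (pvCut max_chars rest running').map (· + 1)

-- A's loop, started with accumulator `sections` and budget `total` spent, equals the slice/join
-- decomposition started at the same point (the truncation count shifted by the snippets already emitted).
theorem pvA_loop_eq (n max_chars : Int) :
    ∀ (items : List (String × String)) (sections : List String) (total : Int),
      pvA_loop n max_chars items sections total =
        (match pvCut max_chars (items.map pvFmt) total with
         | none => sections ++ items.map pvFmt
         | some i =>
             sections ++ (items.map pvFmt).take i ++ [pvMsg (n - ((sections.length : Int) + i))]) := by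
  intro items
  induction items with
  | nil => intro sections total; simp [pvA_loop, pvCut]
  | cons hd tl ih =>
    intro sections total
    obtain ⟨name, code⟩ := hd
    simp only [pvA_loop, pvCut, List.map_cons]
    by_cases h : total + PySem.Str.len (pvFmt (name, code)) > max_chars
    · rw [if_pos h, if_pos h]
      simp
    · rw [if_neg h, if_neg h, ih]
      cases hc : pvCut max_chars (List.map pvFmt tl) (total + PySem.Str.len (pvFmt (name, code))) with
      | none => simp
      | some j =>
        simp only [Option.map_some, List.take_succ_cons, List.length_append,
          List.length_cons, List.length_nil, List.append_assoc, List.cons_append,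
          List.nil_append]
        congr 3
        simp only [List.cons.injEq, and_true]
        congr 1
        push_cast
        ring

-- A's cutoff IS findIdx? of "exceeds the budget" over B's prefix sums
theorem pvCut_eq_findIdx (max_chars : Int) :
    ∀ (ss : List String) (t : Int),
      pvCut max_chars ss t = (pvPrefix ss t).findIdx? (fun x => decide (max_chars < x)) := by
  intro ss
  induction ss with
  | nil => intro t; simp [pvCut, pvPrefix]
  | cons s rest ih =>
    intro t
    simp only [pvCut, pvPrefix, List.findIdx?_cons]
    by_cases h : max_chars < t + (s.length : Int)
    · simp [h]
    · simp [h, ih]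

-- prefix sums dominate their start (snippet lengths are nonnegative)
theorem pvPrefix_ge_start : ∀ (ss : List String) (t : Int), ∀ x ∈ pvPrefix ss t, t ≤ x := by
  intro ss
  induction ss with
  | nil => intro t x hx; simp [pvPrefix] at hx
  | cons s rest ih =>
    intro t x hx
    simp only [pvPrefix, List.mem_cons] at hx
    have hlen : 0 ≤ PySem.Str.len s := by
      simp [PySem.Str.len]
    rcases hx with rfl | hx
    · omega
    · have := ih (t + PySem.Str.len s) x hx
      omega

-- B's prefix list is nondecreasing
theorem pvPrefix_pairwise : ∀ (ss : List String) (t : Int),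
    (pvPrefix ss t).Pairwise (· ≤ ·) := by
  intro ss
  induction ss with
  | nil => intro t; simp [pvPrefix]
  | cons s rest ih =>
    intro t
    simp only [pvPrefix]
    exact List.Pairwise.cons (fun x hx => pvPrefix_ge_start rest _ x hx) (ih _)

theorem pvPrefix_length : ∀ (ss : List String) (t : Int), (pvPrefix ss t).length = ss.length := by
  intro ss
  induction ss with
  | nil => intro t; rfl
  | cons s rest ih => intro t; simp [pvPrefix, ih]

-- the binary-search invariant: it returns a boundary index between the ≤-budget and >-budget zones
theorem pvBsearch_spec (P : List Int) (mc : Int) (hmono : P.Pairwise (· ≤ ·)) :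
    ∀ (fuel lo hi : Nat), hi - lo ≤ fuel → lo ≤ hi → hi ≤ P.length →
      (∀ i, i < lo → ∀ h : i < P.length, P[i] ≤ mc) →
      (∀ i, hi ≤ i → ∀ h : i < P.length, mc < P[i]) →
      lo ≤ pvBsearch P mc lo hi ∧ pvBsearch P mc lo hi ≤ hi ∧
      (∀ i, i < pvBsearch P mc lo hi → ∀ h : i < P.length, P[i] ≤ mc) ∧
      (∀ i, pvBsearch P mc lo hi ≤ i → ∀ h : i < P.length, mc < P[i]) := by
  have hm : ∀ i j, i ≤ j → ∀ hj : j < P.length, ∀ hi : i < P.length, P[i] ≤ P[j] := by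
    intro i j hij hj hi
    rcases Nat.lt_or_ge i j with h | h
    · exact (List.pairwise_iff_getElem.mp hmono) i j hi hj h
    · have : i = j := by omega
      subst this; exact le_refl _
  intro fuel
  induction fuel with
  | zero =>
    intro lo hi hfuel hle hhi hlow hhigh
    have : lo = hi := by omega
    subst this
    rw [pvBsearch, if_neg (by omega)]
    exact ⟨le_refl _, le_refl _, hlow, hhigh⟩
  | succ fuel ih =>
    intro lo hi hfuel hle hhi hlow hhigh
    by_cases hlt : lo < hi
    · rw [pvBsearch, if_pos hlt]
      have hmidlt : (lo + hi) / 2 < hi := by omega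
      have hmidge : lo ≤ (lo + hi) / 2 := by omega
      have hmidP : (lo + hi) / 2 < P.length := by omega
      rw [List.getD_eq_getElem P 0 hmidP]
      by_cases hc : P[(lo + hi) / 2] ≤ mc
      · rw [if_pos hc]
        exact And.imp (fun h => by omega) (id)
          (ih ((lo + hi) / 2 + 1) hi (by omega) (by omega) hhi
            (fun i hi' h => by
              rcases Nat.lt_or_ge i lo with h2 | h2
              · exact hlow i h2 h
              · exact le_trans (hm i ((lo + hi) / 2) (by omega) hmidP h) hc)
            hhigh)
      · rw [if_neg hc]
        rw [not_le] at hc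
        exact And.imp (id) (And.imp (fun h => by omega) (id))
          (ih lo ((lo + hi) / 2) (by omega) (by omega) (by omega) hlow
            (fun i hi' h => lt_of_lt_of_le hc (hm ((lo + hi) / 2) i hi' h hmidP)))
    · rw [pvBsearch, if_neg hlt]
      have : lo = hi := by omega
      subst this
      exact ⟨le_refl _, le_refl _, hlow, hhigh⟩

theorem format_code_snippets_py_spec : Claim_equal_format_code_snippets_py := by
  intro code_dict max_chars _
  unfold Spec_format_code_snippets_py format_code_snippets_py format_code_snippets_py_alt
  simp only []
  by_cases he : (PySem.Dict.ofList code_dict).items.isEmpty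
  · simp [he]
  · simp only [he, Bool.false_eq_true]
    set items := (PySem.Dict.ofList code_dict).items with hitems
    set ss := items.map pvFmt with hss
    set P := pvPrefix ss 0 with hP
    have hPlen : P.length = ss.length := pvPrefix_length ss 0
    obtain ⟨hk0, hkhi, hkle, hkgt⟩ :=
      pvBsearch_spec P max_chars (pvPrefix_pairwise ss 0) P.length 0 P.length
        (by omega) (by omega) (le_refl _) (by omega) (fun i h1 h2 => by omega)
    set k := pvBsearch P max_chars 0 P.length with hk
    rw [pvA_loop_eq, pvCut_eq_findIdx]
    by_cases hfull : k = ss.length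
    · have hnone : P.findIdx? (fun x => decide (max_chars < x)) = none := by
        rw [List.findIdx?_eq_none_iff]
        intro x hx
        obtain ⟨i, hilen, rfl⟩ := List.mem_iff_getElem.mp hx
        simpa using hkle i (by omega) hilen
      rw [← hP, hnone]
      simp [hfull, hss]
    · have hklt : k < P.length := by omega
      have hsome : P.findIdx? (fun x => decide (max_chars < x)) = some k := by
        rw [List.findIdx?_eq_some_iff_getElem]
        refine ⟨hklt, by simpa using hkgt k (le_refl _) hklt, fun j hj => by simpa using hkle j hj (by omega)⟩
      rw [← hP, hsome]
      simp only [List.nil_append, if_neg hfull]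
      congr 3
      simp only [List.cons.injEq, and_true]
      congr 1
      simp [hss]
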